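-- pv_equiv track=rewrite | github.com/traderx888/notion-autopublish | tools/telegram_schedule_audit.py | _split_scheduler_blocks
-- ===== SOURCE A (Python) =====
-- KNOWN_SCHEDULER_FIELDS = (
--     "Repeat: Until: Time:",
--     "Repeat: Every:",
--     "Task To Run:",
--     "Schedule Type:",
--     "Start Time:",
--     "Start Date:",
--     "TaskName:",
--     "Start In:",
--     "Comment:",
--     "Status:",
--     "Days:",
--     "Months:",
-- )
--
-- def _split_scheduler_blocks(text: str) -> list[dict[str, str]]:
--     blocks: list[dict[str, str]] = []
--     current: dict[str, str] = {}
--     for raw_line in text.splitlines():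
--         line = raw_line.rstrip()
--         if not line:
--             if current:
--                 blocks.append(current)
--                 current = {}
--             continue
--         for prefix in KNOWN_SCHEDULER_FIELDS:
--             if line.startswith(prefix):
--                 current[prefix[:-1]] = line[len(prefix) :].strip()
--                 break
--     if current:
--         blocks.append(current)
--     return blocks
-- ===== SOURCE B (Python) =====
-- KNOWN_SCHEDULER_FIELDS = (
--     "Repeat: Until: Time:",
--     "Repeat: Every:",
--     "Task To Run:",
--     "Schedule Type:",
--     "Start Time:",
--     "Start Date:",
--     "TaskName:",
--     "Start In:",
--     "Comment:",
--     "Status:",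
--     "Days:",
--     "Months:",
-- )
--
--
-- def _match_field(line):
--     prefix = next((p for p in KNOWN_SCHEDULER_FIELDS if line.startswith(p)), None)
--     if prefix is None:
--         return None
--     return prefix[:-1], line[len(prefix):].strip()
--
--
-- def _split_scheduler_blocks(text: str) -> list:
--     lines = [raw.rstrip() for raw in text.splitlines()]
--     n = len(lines)
--     # first pass: segment into maximal runs of non-blank lines
--     groups = []
--     i = 0
--     while i < n:
--         if not lines[i]:
--             i += 1
--             continue
--         j = i
--         while j < n and lines[j]:
--             j += 1
--         groups.append(lines[i:j])
--         i = j
--     # second pass: one dict per group, empty dicts dropped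
--     result = []
--     for group in groups:
--         fields = dict(m for m in map(_match_field, group) if m is not None)
--         if fields:
--             result.append(fields)
--     return result
-- ===== Notes on version B (the rewrite author's own statement) =====
-- stated objective: simpler
-- what changed: B separates the work into two passes — segment the rstripped lines into maximal runs of non-blank lines (index-based two-pointer scan), then build one dict per run from the first-matching-prefix pairs and keep the non-empty ones — instead of A's single interleaved loop over lines with a mutable current dict flushed at blank lines.
import Mathlib
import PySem

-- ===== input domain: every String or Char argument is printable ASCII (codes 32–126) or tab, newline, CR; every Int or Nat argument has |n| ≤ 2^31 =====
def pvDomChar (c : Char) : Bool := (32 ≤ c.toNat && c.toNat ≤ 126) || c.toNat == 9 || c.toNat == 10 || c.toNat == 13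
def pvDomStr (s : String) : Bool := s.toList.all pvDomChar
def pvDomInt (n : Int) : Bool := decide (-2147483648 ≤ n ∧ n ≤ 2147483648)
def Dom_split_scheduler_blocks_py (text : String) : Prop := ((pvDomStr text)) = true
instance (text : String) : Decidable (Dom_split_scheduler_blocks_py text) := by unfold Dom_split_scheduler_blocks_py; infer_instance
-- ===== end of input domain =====

-- B separates segmentation (runs of non-blank lines) from field extraction instead of
-- interleaving them with a mutable `current` dict; objective: simpler decomposition, same cost.

def pvFields : List String :=
  ["Repeat: Until: Time:", "Repeat: Every:", "Task To Run:", "Schedule Type:",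
   "Start Time:", "Start Date:", "TaskName:", "Start In:", "Comment:", "Status:",
   "Days:", "Months:"]

-- ===== PORT A =====
-- inner `for prefix in KNOWN_SCHEDULER_FIELDS: … break` loop of A
def pvInnerA (line : String) (current : PySem.Dict String String) :
    List String → PySem.Dict String String
  | [] => current
  | p :: ps =>
    if PySem.Str.startswith line p then
      current.insert (PySem.Str.slice p none (some (-1)))
        (PySem.Str.strip (PySem.Str.slice line (some (PySem.Str.len p)) none))
    else pvInnerA line current ps

-- body of A's `for raw_line in text.splitlines()` loop, on the already-rstripped line
def pvStepA (st : List (PySem.Dict String String) × PySem.Dict String String)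
    (line : String) : List (PySem.Dict String String) × PySem.Dict String String :=
  if line = "" then
    if st.2.items = [] then st else (st.1 ++ [st.2], PySem.Dict.empty)
  else (st.1, pvInnerA line st.2 pvFields)

def split_scheduler_blocks_py (text : String) : List (List (String × String)) :=
  let fin := (PySem.Str.splitlines text).foldl
    (fun st raw => pvStepA st (PySem.Str.rstrip raw)) ([], PySem.Dict.empty);
  (if fin.2.items = [] then fin.1 else fin.1 ++ [fin.2]).map (fun d => d.items)

-- ===== PORT B =====
-- _match_field: first matching prefix (or none), with its key/value pair
def pvMatchField (line : String) : Option (String × String) :=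
  match pvFields.find? (fun p => PySem.Str.startswith line p) with
  | none => none
  | some p =>
      some (PySem.Str.slice p none (some (-1)),
            PySem.Str.strip (PySem.Str.slice line (some (PySem.Str.len p)) none))

-- first pass of B: maximal runs of non-blank lines (the two-pointer while loops)
def pvGroups : List String → List (List String)
  | [] => []
  | l :: rest =>
    if l = "" then pvGroups rest
    else (l :: rest.takeWhile (· ≠ "")) :: pvGroups (rest.dropWhile (· ≠ ""))
termination_by ls => ls.length
decreasing_by
  · simp
  · exact Nat.lt_succ_of_le (List.length_dropWhile_le _ _)

def split_scheduler_blocks_py_alt (text : String) : List (List (String × String)) :=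
  let lines := (PySem.Str.splitlines text).map PySem.Str.rstrip;
  ((pvGroups lines).map
      (fun g => (PySem.Dict.ofList (g.filterMap pvMatchField)).items)).filter (· ≠ [])

-- ===== PRECONDITION & SPEC =====
def Spec_split_scheduler_blocks_py (text : String) (out : List (List (String × String))) : Prop := out = split_scheduler_blocks_py_alt text
instance (text : String) (out : List (List (String × String))) : Decidable (Spec_split_scheduler_blocks_py text out) := by unfold Spec_split_scheduler_blocks_py; infer_instance

-- ===== CLAIM (what is proved, stated in full; the proofs are below) =====
def Claim_equal_split_scheduler_blocks_py : Prop := ∀ (text : String), Dom_split_scheduler_blocks_py text → Spec_split_scheduler_blocks_py text (split_scheduler_blocks_py text)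

-- ===== LEMMAS AND PROOFS =====

-- apply one (rstripped, non-blank) line to the current dict, the way both programs do
def pvApply (d : PySem.Dict String String) (line : String) : PySem.Dict String String :=
  match pvMatchField line with
  | none => d
  | some (k, v) => d.insert k v

-- emit the pending dict, dropping it if empty
def pvFlush (d : PySem.Dict String String) : List (List (String × String)) :=
  if d.items = [] then [] else [d.items]

-- reference recursion: result from a pending dict `cur` and remaining rstripped lines
def pvK (cur : PySem.Dict String String) : List String → List (List (String × String))
  | [] => pvFlush cur
  | l :: rest => if l = "" then pvFlush cur ++ pvK PySem.Dict.empty rest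
                 else pvK (pvApply cur l) rest

theorem pvInnerA_eq_apply (line : String) (d : PySem.Dict String String) :
    pvInnerA line d pvFields = pvApply d line := by
  unfold pvApply pvMatchField
  generalize pvFields = ps
  induction ps with
  | nil => simp [pvInnerA, List.find?]
  | cons p ps ih =>
    by_cases h : PySem.Chars.startswith line.toList p.toList = true
    · simp [pvInnerA, List.find?, h]
    · rw [Bool.not_eq_true] at h
      simpa [pvInnerA, List.find?, h] using ih

theorem pvEmpty_of_items_nil (d : PySem.Dict String String) (h : d.items = []) :
    d = PySem.Dict.empty := by
  apply PySem.Dict.ext; simpa using h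

-- A's fold, started from (bs, cur), equals bs (already emitted) followed by pvK cur
theorem pvA_fold_eq_K (raws : List String) :
    ∀ (bs : List (PySem.Dict String String)) (cur : PySem.Dict String String),
    (let fin := raws.foldl (fun st raw => pvStepA st (PySem.Str.rstrip raw)) (bs, cur);
     (if fin.2.items = [] then fin.1 else fin.1 ++ [fin.2]).map (fun d => d.items))
      = bs.map (fun d => d.items) ++ pvK cur (raws.map PySem.Str.rstrip) := by
  induction raws with
  | nil =>
    intro bs cur
    simp only [List.foldl_nil, List.map_nil, pvK, pvFlush]
    split <;> simp_all
  | cons raw rest ih =>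
    intro bs cur
    simp only [List.foldl_cons, List.map_cons, pvK]
    by_cases hl : PySem.Str.rstrip raw = ""
    · rw [hl]
      by_cases hc : cur.items = []
      · have hstep : pvStepA (bs, cur) "" = (bs, cur) := by simp [pvStepA, hc]
        rw [hstep, ih bs cur, pvEmpty_of_items_nil cur hc]
        simp [pvFlush, PySem.Dict.empty]
      · have hstep : pvStepA (bs, cur) "" = (bs ++ [cur], PySem.Dict.empty) := by
          simp [pvStepA, hc]
        rw [hstep, ih (bs ++ [cur]) PySem.Dict.empty]
        simp [pvFlush, hc]
    · have hstep : pvStepA (bs, cur) (PySem.Str.rstrip raw)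
          = (bs, pvInnerA (PySem.Str.rstrip raw) cur pvFields) := by
        simp [pvStepA, hl]
      rw [hstep, ih bs (pvInnerA (PySem.Str.rstrip raw) cur pvFields), pvInnerA_eq_apply]
      simp [hl]

-- folding pvApply is folding insert over the matched pairs
theorem pvFold_apply_eq_update (g : List String) :
    ∀ (d : PySem.Dict String String),
    g.foldl pvApply d = d.update (g.filterMap pvMatchField) := by
  induction g with
  | nil => intro d; simp [PySem.Dict.update]
  | cons l g ih =>
    intro d
    simp only [List.foldl_cons, List.filterMap_cons]
    cases h : pvMatchField l with
    | none => simpa [pvApply, h] using ih d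
    | some kv => simp [pvApply, h, ih, PySem.Dict.update]

-- pvK rewrites one whole non-blank run at a time
theorem pvK_run (ls : List String) : ∀ (cur : PySem.Dict String String),
    pvK cur ls = pvFlush ((ls.takeWhile (· ≠ "")).foldl pvApply cur)
      ++ pvK PySem.Dict.empty (ls.dropWhile (· ≠ "")) := by
  induction ls with
  | nil => intro cur; simp [pvK, pvFlush, PySem.Dict.empty]
  | cons l rest ih =>
    intro cur
    by_cases hl : l = ""
    · subst hl
      simp only [pvK, List.takeWhile, List.dropWhile, ne_eq,
        not_true_eq_false, decide_false, List.foldl_nil]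
      simp [pvFlush, PySem.Dict.empty]
    · simp only [pvK, List.takeWhile, List.dropWhile, ne_eq, hl,
      not_false_eq_true, decide_true, List.foldl_cons]
      exact ih (pvApply cur l)

-- pvK from an empty pending dict is exactly B's group-based pass
theorem pvK_empty_eq_groups (ls : List String) :
    pvK PySem.Dict.empty ls
      = ((pvGroups ls).map
          (fun g => (PySem.Dict.ofList (g.filterMap pvMatchField)).items)).filter (· ≠ []) := by
  induction ls using pvGroups.induct with
  | case1 => simp [pvK, pvGroups, pvFlush, PySem.Dict.empty]
  | case2 rest ih =>
    simpa [pvK, pvGroups, pvFlush, PySem.Dict.empty] using ih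
  | case3 l rest hl ih =>
    rw [pvK_run]
    have htake : (l :: rest).takeWhile (· ≠ "") = l :: rest.takeWhile (· ≠ "") := by
      simp [List.takeWhile, hl]
    have hdrop : (l :: rest).dropWhile (· ≠ "") = rest.dropWhile (· ≠ "") := by
      simp [List.dropWhile, hl]
    rw [htake, hdrop, ih, pvFold_apply_eq_update]
    simp only [pvGroups, if_neg hl, List.map_cons, List.filter_cons]
    rw [show PySem.Dict.empty.update ((l :: rest.takeWhile (· ≠ "")).filterMap pvMatchField)
          = PySem.Dict.ofList ((l :: rest.takeWhile (· ≠ "")).filterMap pvMatchField) from rfl]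
    unfold pvFlush
    split <;> simp_all

-- ===== VERDICT (by name: the statement is the Claim_ definition above) =====
theorem split_scheduler_blocks_py_spec : Claim_equal_split_scheduler_blocks_py := by
  intro text _
  show split_scheduler_blocks_py text = split_scheduler_blocks_py_alt text
  unfold split_scheduler_blocks_py split_scheduler_blocks_py_alt
  have := pvA_fold_eq_K (PySem.Str.splitlines text) [] PySem.Dict.empty
  simp only [List.map_nil, List.nil_append] at this
  rw [this, pvK_empty_eq_groups]
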